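-- pv_equiv track=rewrite | github.com/ishitachaturvedi/gpgpu-sim_distribution | fast_v2_indep_SM_sched.py | threes
-- ===== SOURCE A (Python) =====
-- def Sort(sub_li,key):
--     sub_li.sort(key = lambda x: x[key],reverse=False)
--     return sub_li
--
-- def threes(numStalls,warp_three_c,counter,num_shaders,num_sched):
--     # List to store final twostall sorted values
--     final_stall = []
--
--     # For each stall find the minimum speedup across all SMs -  min speedup = max # of cycles left after (total cycles the sched in SM runs for - #cycles stalled because of a particular stall)
--     for stall1 in range(numStalls):
--         for stall2i in range(stall1+1,numStalls):
--             stall2 = stall2i - (stall1+1)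
--             for stall3i in range(stall2i+1,numStalls):
--                 stall3 = stall3i - (stall2i+1)
--                 # Max number of cycles left after removing the stall
--                 maxCyclesLeft = 0
--                 # Cycles the longest running SM after stall removal actually had run for
--                 cyclesSMRan = 0
--                 for SM in range(num_shaders):
--                     for sched in range(num_sched):
--                         diff = counter[SM][sched] - warp_three_c[SM][sched][stall1][stall2][stall3]
--                         if (diff >  maxCyclesLeft):
--                             maxCyclesLeft = diff
--                             cyclesSMRan = counter[SM][sched]
--                 # Now add the # cycles left after stall removal and total number of cycles the SM ran for with stalls to indep
--                 temp = []
--                 temp.append(stall1)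
--                 temp.append(stall2i)
--                 temp.append(stall3i)
--                 temp.append(maxCyclesLeft)
--                 temp.append(cyclesSMRan)
--                 final_stall.append(temp)
--
--     # All the required values are here, now sort them in ascending order
--     final_stall = Sort(final_stall,3)
--     return final_stall
-- ===== SOURCE B (Python) =====
-- # Transposed decomposition: one pass over (SM, sched) maintaining a vector of
-- # per-triple running (maxCyclesLeft, cyclesSMRan) accumulators, instead of
-- # rescanning all SMs/scheds for every triple; same strict '>' first-winner rule.
-- def _upd(counter, warp_three_c, SM, sched, t, a):
--     s1, s2i, s3i = t
--     best, ran = a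
--     cnt = counter[SM][sched]
--     diff = cnt - warp_three_c[SM][sched][s1][s2i - (s1 + 1)][s3i - (s2i + 1)]
--     if diff > best:
--         return (diff, cnt)
--     return (best, ran)
--
-- def threes(numStalls, warp_three_c, counter, num_shaders, num_sched):
--     triples = [(s1, s2i, s3i)
--                for s1 in range(numStalls)
--                for s2i in range(s1 + 1, numStalls)
--                for s3i in range(s2i + 1, numStalls)]
--     acc = [(0, 0)] * len(triples)
--     if triples:
--         for SM in range(num_shaders):
--             for sched in range(num_sched):
--                 acc = [_upd(counter, warp_three_c, SM, sched, t, a)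
--                        for t, a in zip(triples, acc)]
--     out = [[s1, s2i, s3i, best, ran]
--            for (s1, s2i, s3i), (best, ran) in zip(triples, acc)]
--     out.sort(key=lambda x: x[3])
--     return out
-- ===== Notes on version B (the rewrite author's own statement) =====
-- stated objective: alternative
-- what changed: B transposes the loop nesting: a single pass over (SM, sched) updates a vector of per-triple (maxCyclesLeft, cyclesSMRan) accumulators built from a precomputed triple list, instead of A's rescan of all SMs and schedulers for every stall triple; same strict '>' first-winner rule and the same stable sort by field 3.
import Mathlib
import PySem

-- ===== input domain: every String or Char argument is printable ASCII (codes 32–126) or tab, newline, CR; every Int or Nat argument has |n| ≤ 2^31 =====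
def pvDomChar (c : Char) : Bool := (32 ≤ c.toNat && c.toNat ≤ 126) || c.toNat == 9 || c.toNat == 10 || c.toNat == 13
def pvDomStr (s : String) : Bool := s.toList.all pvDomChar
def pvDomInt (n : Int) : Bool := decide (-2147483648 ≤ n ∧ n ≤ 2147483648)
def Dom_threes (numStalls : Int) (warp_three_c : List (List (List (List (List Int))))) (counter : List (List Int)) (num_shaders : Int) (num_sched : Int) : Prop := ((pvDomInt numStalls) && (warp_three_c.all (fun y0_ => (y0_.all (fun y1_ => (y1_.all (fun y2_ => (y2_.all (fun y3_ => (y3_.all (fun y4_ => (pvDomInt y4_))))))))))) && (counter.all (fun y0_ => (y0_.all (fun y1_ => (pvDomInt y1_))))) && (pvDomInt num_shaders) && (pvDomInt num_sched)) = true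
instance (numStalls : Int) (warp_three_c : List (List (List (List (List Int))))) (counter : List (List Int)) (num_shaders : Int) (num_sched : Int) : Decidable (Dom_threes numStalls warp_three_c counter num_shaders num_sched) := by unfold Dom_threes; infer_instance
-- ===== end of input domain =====

-- B transposes the loop nesting (one pass over (SM, sched) with a vector of per-triple
-- accumulators, instead of rescanning all SMs/scheds per triple); objective: alternative
-- decomposition of the same cost.  A's helper Sort mutates (and returns) its list argument,
-- but only on the function-local final_stall, so no caller-visible mutation is involved.

-- ===== PORT A =====
def threes (numStalls : Int) (warp_three_c : List (List (List (List (List Int))))) (counter : List (List Int)) (num_shaders : Int) (num_sched : Int) : List (List Int) :=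
  let final_stall : List (List Int) :=
    (PySem.List.pyRange 0 numStalls 1).foldl (fun fs s1 =>
      (PySem.List.pyRange (s1+1) numStalls 1).foldl (fun fs s2i =>
        let s2 := s2i - (s1+1)
        (PySem.List.pyRange (s2i+1) numStalls 1).foldl (fun fs s3i =>
          let s3 := s3i - (s2i+1)
          let mc : Int × Int :=
            (PySem.List.pyRange 0 num_shaders 1).foldl (fun (mc : Int × Int) SM =>
              (PySem.List.pyRange 0 num_sched 1).foldl (fun (mc : Int × Int) sched =>
                let diff := PySem.List.pyGetD (PySem.List.pyGetD counter SM []) sched 0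
                  - PySem.List.pyGetD (PySem.List.pyGetD (PySem.List.pyGetD (PySem.List.pyGetD (PySem.List.pyGetD warp_three_c SM []) sched []) s1 []) s2 []) s3 0
                if diff > mc.1 then (diff, PySem.List.pyGetD (PySem.List.pyGetD counter SM []) sched 0)
                else mc) mc) (0, 0)
          fs ++ [[s1, s2i, s3i, mc.1, mc.2]]) fs) fs) []
  PySem.List.sorted final_stall (fun x => PySem.List.pyGetD x 3 0) false

-- ===== PORT B =====
def upd_alt (counter : List (List Int)) (warp_three_c : List (List (List (List (List Int))))) (SM sched : Int) (t : Int × Int × Int) (a : Int × Int) : Int × Int :=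
  let cnt := PySem.List.pyGetD (PySem.List.pyGetD counter SM []) sched 0
  let diff := cnt - PySem.List.pyGetD (PySem.List.pyGetD (PySem.List.pyGetD (PySem.List.pyGetD (PySem.List.pyGetD warp_three_c SM []) sched []) t.1 []) (t.2.1 - (t.1+1)) []) (t.2.2 - (t.2.1+1)) 0
  if diff > a.1 then (diff, cnt) else a

def threes_alt (numStalls : Int) (warp_three_c : List (List (List (List (List Int))))) (counter : List (List Int)) (num_shaders : Int) (num_sched : Int) : List (List Int) :=
  let triples : List (Int × Int × Int) :=
    (PySem.List.pyRange 0 numStalls 1).flatMap (fun s1 =>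
      (PySem.List.pyRange (s1+1) numStalls 1).flatMap (fun s2i =>
        (PySem.List.pyRange (s2i+1) numStalls 1).map (fun s3i => (s1, s2i, s3i))))
  let acc0 : List (Int × Int) := List.replicate triples.length (0, 0)
  let accF : List (Int × Int) :=
    if triples.isEmpty then acc0 else
    (PySem.List.pyRange 0 num_shaders 1).foldl (fun acc SM =>
      (PySem.List.pyRange 0 num_sched 1).foldl (fun acc sched =>
        List.zipWith (fun t a => upd_alt counter warp_three_c SM sched t a) triples acc) acc) acc0
  let out := List.zipWith (fun (t : Int × Int × Int) (a : Int × Int) => [t.1, t.2.1, t.2.2, a.1, a.2]) triples accF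
  PySem.List.sorted out (fun x => PySem.List.pyGetD x 3 0) false

-- ===== PRECONDITION & SPEC =====
-- Pre_: exactly the inputs on which Python A returns normally (it raises IndexError
-- otherwise): whenever at least one stall triple and one (SM, sched) pair exist, every
-- list A indexes must be long enough, stated as shape bounds on counter/warp_three_c.
def Pre_threes (numStalls : Int) (warp_three_c : List (List (List (List (List Int))))) (counter : List (List Int)) (num_shaders : Int) (num_sched : Int) : Prop :=
  (3 ≤ numStalls ∧ 1 ≤ num_shaders ∧ 1 ≤ num_sched) →
    (num_shaders ≤ (counter.length : Int) ∧
     (∀ row ∈ counter.take num_shaders.toNat, num_sched ≤ (row.length : Int)) ∧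
     num_shaders ≤ (warp_three_c.length : Int) ∧
     (∀ wsm ∈ warp_three_c.take num_shaders.toNat,
        num_sched ≤ (wsm.length : Int) ∧
        ∀ wsched ∈ wsm.take num_sched.toNat,
          numStalls - 2 ≤ (wsched.length : Int) ∧
          ∀ p ∈ (wsched.take (numStalls - 2).toNat).zipIdx,
            numStalls - (p.2 : Int) - 2 ≤ (p.1.length : Int) ∧
            ∀ q ∈ (p.1.take (numStalls - (p.2 : Int) - 2).toNat).zipIdx,
              numStalls - ((p.2 : Int) + 1 + (q.2 : Int)) - 1 ≤ (q.1.length : Int)))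
instance (numStalls : Int) (warp_three_c : List (List (List (List (List Int))))) (counter : List (List Int)) (num_shaders : Int) (num_sched : Int) : Decidable (Pre_threes numStalls warp_three_c counter num_shaders num_sched) := by unfold Pre_threes; infer_instance

def pvWitness_threes : Int × List (List (List (List (List Int)))) × List (List Int) × Int × Int :=
  (3, [[[[[5]]]]], [[10]], 1, 1)

def Spec_threes (numStalls : Int) (warp_three_c : List (List (List (List (List Int))))) (counter : List (List Int)) (num_shaders : Int) (num_sched : Int) (out : List (List Int)) : Prop := out = threes_alt numStalls warp_three_c counter num_shaders num_sched
instance (numStalls : Int) (warp_three_c : List (List (List (List (List Int))))) (counter : List (List Int)) (num_shaders : Int) (num_sched : Int) (out : List (List Int)) : Decidable (Spec_threes numStalls warp_three_c counter num_shaders num_sched out) := by unfold Spec_threes; infer_instance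

-- ===== CLAIM (what is proved, stated in full; the proofs are below) =====
def Claim_equal_threes : Prop := ∀ (numStalls : Int) (warp_three_c : List (List (List (List (List Int))))) (counter : List (List Int)) (num_shaders : Int) (num_sched : Int), Dom_threes numStalls warp_three_c counter num_shaders num_sched → Pre_threes numStalls warp_three_c counter num_shaders num_sched → Spec_threes numStalls warp_three_c counter num_shaders num_sched (threes numStalls warp_three_c counter num_shaders num_sched)

-- ===== LEMMAS AND PROOFS =====

-- zipWith with the same left list twice fuses.
theorem zipWith_zipWith_same {α β γ δ : Type} (f : α → γ → δ) (g : α → β → γ) (ts : List α) (as_ : List β) :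
    List.zipWith f ts (List.zipWith g ts as_) = List.zipWith (fun t a => f t (g t a)) ts as_ := by
  induction ts generalizing as_ with
  | nil => simp
  | cons t ts ih => cases as_ with
    | nil => simp
    | cons a as_ => simp [ih]

theorem zipWith_id_right {α β : Type} (ts : List α) (as_ : List β) (h : as_.length ≤ ts.length) :
    List.zipWith (fun _ a => a) ts as_ = as_ := by
  induction ts generalizing as_ with
  | nil => simp_all
  | cons t ts ih => cases as_ with
    | nil => simp
    | cons a as_ => simp_all

theorem zipWith_replicate_right {α β γ : Type} (f : α → β → γ) (ts : List α) (c : β) :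
    List.zipWith f ts (List.replicate ts.length c) = ts.map (fun t => f t c) := by
  induction ts with
  | nil => rfl
  | cons t ts ih => simp [List.replicate_succ, ih]

-- Loop transposition for a doubly nested pass: folding "update every slot" steps over
-- P × Q equals, per slot, folding the steps for that slot alone.
theorem foldl_zipWith_transpose {π α β : Type} (P : List π) (F : π → α → β → β)
    (ts : List α) (as_ : List β) (h : as_.length ≤ ts.length) :
    P.foldl (fun acc p => List.zipWith (fun t a => F p t a) ts acc) as_
      = List.zipWith (fun t a => P.foldl (fun a p => F p t a) a) ts as_ := by
  induction P generalizing as_ with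
  | nil => simp [zipWith_id_right ts as_ h]
  | cons p P ih =>
      simp only [List.foldl_cons]
      rw [ih _ (by simp [List.length_zipWith]), zipWith_zipWith_same]

theorem foldl2_zipWith_transpose {π ρ α β : Type} (P : List π) (Q : List ρ) (F : π → ρ → α → β → β)
    (ts : List α) (as_ : List β) (h : as_.length ≤ ts.length) :
    P.foldl (fun acc p => Q.foldl (fun acc q => List.zipWith (fun t a => F p q t a) ts acc) acc) as_
      = List.zipWith (fun t a => P.foldl (fun a p => Q.foldl (fun a q => F p q t a) a) a) ts as_ := by
  induction P generalizing as_ with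
  | nil => simp [zipWith_id_right ts as_ h]
  | cons p P ih =>
      simp only [List.foldl_cons]
      rw [foldl_zipWith_transpose Q (fun q t a => F p q t a) ts as_ h,
          ih _ (by simp [List.length_zipWith]), zipWith_zipWith_same]

-- The no-triples guard is a no-op on the value: with ts = [] the pass fixes [] anyway.
theorem guard_fold_eq {π ρ α β : Type} (P : List π) (Q : List ρ) (F : π → ρ → α → β → β)
    (ts : List α) (c : β) :
    (if ts.isEmpty then List.replicate ts.length c
     else P.foldl (fun acc p => Q.foldl (fun acc q => List.zipWith (fun t a => F p q t a) ts acc) acc) (List.replicate ts.length c))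
      = P.foldl (fun acc p => Q.foldl (fun acc q => List.zipWith (fun t a => F p q t a) ts acc) acc) (List.replicate ts.length c) := by
  cases ts with
  | cons t ts => simp
  | nil =>
      have hQ : List.foldl (fun (acc : List β) (_ : ρ) => ([] : List β)) [] Q = [] := by
        induction Q with
        | nil => rfl
        | cons q Q ihQ => simpa using ihQ
      simp only [List.isEmpty_nil, if_pos, List.zipWith_nil_left]
      induction P with
      | nil => rfl
      | cons p P ihP => simpa [hQ] using ihP

theorem threes_eq (numStalls : Int) (warp_three_c : List (List (List (List (List Int))))) (counter : List (List Int)) (num_shaders : Int) (num_sched : Int) :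
    threes numStalls warp_three_c counter num_shaders num_sched
      = threes_alt numStalls warp_three_c counter num_shaders num_sched := by
  simp only [threes, threes_alt]
  rw [guard_fold_eq]
  rw [foldl2_zipWith_transpose (PySem.List.pyRange 0 num_shaders 1) (PySem.List.pyRange 0 num_sched 1)
        (fun SM sched t a => upd_alt counter warp_three_c SM sched t a) _ _ (by simp)]
  congr 1
  simp only [zipWith_replicate_right]
  simp only [List.zipWith_map_right, List.zipWith_self]
  simp only [PySem.List.foldl_append_singleton_eq_map, PySem.List.foldl_append_eq_flatMap,
    List.nil_append, List.map_flatMap, List.map_map]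
  simp [upd_alt, Function.comp_def]

-- ===== VERDICT (by name: the statement is the Claim_ definition above) =====
theorem threes_spec : Claim_equal_threes := by
  intro numStalls warp counter nsh nsc _ _
  unfold Spec_threes
  exact threes_eq numStalls warp counter nsh nsc
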